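-- pv_equiv track=rewrite | github.com/D13David/advent_of_code | 2025/day09.py | part2
-- ===== SOURCE A (Python) =====
-- from itertools import combinations
-- import bisect
--
-- def part2(points):
--     # Build horizontal and vertical edges
--     horizontal_edges = []
--     vertical_edges = []
--
--     n = len(points)
--     for i in range(n):
--         x1, y1 = points[i]
--         x2, y2 = points[(i + 1) % n]
--
--         if x1 == x2:
--             vertical_edges.append((min(y1, y2), max(y1, y2), x1))
--         else:
--             horizontal_edges.append((min(x1, x2), max(x1, x2), y1))
--
--     # Longest edges
--     longest_h = max(horizontal_edges, key=lambda t: t[1] - t[0])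
--     longest_v = max(vertical_edges, key=lambda t: t[1] - t[0])
--
--     # Sort for bisect
--     horizontal_edges.sort(key=lambda h: h[2])
--     vertical_edges.sort(key=lambda v: v[2])
--
--     h_y_coords = [h[2] for h in horizontal_edges]
--     v_x_coords = [v[2] for v in vertical_edges]
--
--     largest_area = 0
--     best_rect = None
--
--     # Function to check rectangle validity
--     def is_valid(x1, y1, x2, y2):
--         rect = (x1, y1, x2, y2)
--         rx1, ry1, rx2, ry2 = rect
--
--         # Longest horizontal
--         hx1, hx2, hy = longest_h
--         if ry1 < hy < ry2 and (hx1 < rx2 <= hx2 or hx1 <= rx1 < hx2):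
--             return False
--
--         # Longest vertical
--         vy1, vy2, vx = longest_v
--         if rx1 < vx < rx2 and (vy1 < ry2 <= vy2 or vy1 <= ry1 < vy2):
--             return False
--
--         # Check horizontal edges
--         h_start = bisect.bisect_right(h_y_coords, ry1)
--         h_end = bisect.bisect_left(h_y_coords, ry2)
--         if any(ex1 < rx2 <= ex2 or ex1 <= rx1 < ex2
--                for ex1, ex2, ey in horizontal_edges[h_start:h_end]):
--             return False
--
--         # Check vertical edges
--         v_start = bisect.bisect_right(v_x_coords, rx1)
--         v_end = bisect.bisect_left(v_x_coords, rx2)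
--         if any(ey1 < ry2 <= ey2 or ey1 <= ry1 < ey2
--                for ey1, ey2, ex in vertical_edges[v_start:v_end]):
--             return False
--
--         return True
--
--     # Iterate all pairs
--     for (x1, y1), (x2, y2) in combinations(points, 2):
--         rx1, ry1, rx2, ry2 = min(x1, x2), min(y1, y2), max(x1, x2), max(y1, y2)
--         area = (rx2 - rx1 + 1) * (ry2 - ry1 + 1)
--
--         if area <= largest_area:
--             continue
--
--         if is_valid(rx1, ry1, rx2, ry2):
--             largest_area = area
--             best_rect = ((x1, y1), (x2, y2))
--
--     return largest_area, best_rect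
-- ===== SOURCE B (Python) =====
-- from itertools import combinations
--
-- def part2(points):
--     # Build horizontal and vertical edges from cyclically adjacent point pairs
--     hedges = []
--     vedges = []
--     for (x1, y1), (x2, y2) in zip(points, points[1:] + points[:1]):
--         if x1 == x2:
--             vedges.append((min(y1, y2), max(y1, y2), x1))
--         else:
--             hedges.append((min(x1, x2), max(x1, x2), y1))
--
--     if not hedges or not vedges:
--         raise ValueError("polygon needs both horizontal and vertical edges")
--
--     # A rectangle is blocked iff some edge crosses its interior band and overlaps it
--     def blocked(rx1, ry1, rx2, ry2):
--         return any(ry1 < ey < ry2 and (ex1 < rx2 <= ex2 or ex1 <= rx1 < ex2)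
--                    for ex1, ex2, ey in hedges) \
--             or any(rx1 < ex < rx2 and (ey1 < ry2 <= ey2 or ey1 <= ry1 < ey2)
--                    for ey1, ey2, ex in vedges)
--
--     largest_area, best_rect = 0, None
--     for (x1, y1), (x2, y2) in combinations(points, 2):
--         rx1, ry1 = min(x1, x2), min(y1, y2)
--         rx2, ry2 = max(x1, x2), max(y1, y2)
--         area = (rx2 - rx1 + 1) * (ry2 - ry1 + 1)
--         if area > largest_area and not blocked(rx1, ry1, rx2, ry2):
--             largest_area, best_rect = area, ((x1, y1), (x2, y2))
--     return largest_area, best_rect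
-- ===== Notes on version B (the rewrite author's own statement) =====
-- stated objective: simpler
-- what changed: Dropped the longest-edge precomputation, the sort-by-coordinate and the bisect narrowing: validity is now one plain linear scan of every edge with an explicit strict-betweenness test, and the edge pairs are built by zipping the point list with its rotation instead of modular indexing.
import Mathlib
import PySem

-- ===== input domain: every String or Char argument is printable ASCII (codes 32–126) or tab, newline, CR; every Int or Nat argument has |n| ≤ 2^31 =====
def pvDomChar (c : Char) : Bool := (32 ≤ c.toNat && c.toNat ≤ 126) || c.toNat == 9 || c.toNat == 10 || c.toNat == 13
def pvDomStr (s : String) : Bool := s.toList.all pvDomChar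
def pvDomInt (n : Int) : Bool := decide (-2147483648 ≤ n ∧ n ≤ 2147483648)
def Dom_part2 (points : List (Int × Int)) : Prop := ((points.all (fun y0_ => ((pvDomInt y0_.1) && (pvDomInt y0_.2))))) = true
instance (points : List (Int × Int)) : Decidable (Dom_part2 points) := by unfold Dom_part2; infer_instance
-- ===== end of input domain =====

-- B replaces the longest-edge shortcut, the sort and the bisect narrowing by one linear scan of
-- every edge (objective: simpler); both reject polygons lacking a horizontal or a vertical edge
-- (A via max() of an empty sequence, B via an explicit check) — those inputs lie outside Pre_.

-- ===== PORT A =====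
-- A's edge-building loop: for i in range(n), split points[i] → points[(i+1) % n] by orientation
def part2Edges (points : List (Int × Int)) :
    List (Int × Int × Int) × List (Int × Int × Int) :=
  (PySem.List.pyRange 0 (PySem.List.len points) 1).foldl (fun acc i =>
    if (PySem.List.pyGetD points i ((0 : Int), (0 : Int))).1
        = (PySem.List.pyGetD points (PySem.Int.mod (i + 1) (PySem.List.len points)) ((0 : Int), (0 : Int))).1 then
      (acc.1, acc.2 ++ [(min (PySem.List.pyGetD points i ((0 : Int), (0 : Int))).2
          (PySem.List.pyGetD points (PySem.Int.mod (i + 1) (PySem.List.len points)) ((0 : Int), (0 : Int))).2,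
        max (PySem.List.pyGetD points i ((0 : Int), (0 : Int))).2
          (PySem.List.pyGetD points (PySem.Int.mod (i + 1) (PySem.List.len points)) ((0 : Int), (0 : Int))).2,
        (PySem.List.pyGetD points i ((0 : Int), (0 : Int))).1)])
    else
      (acc.1 ++ [(min (PySem.List.pyGetD points i ((0 : Int), (0 : Int))).1
          (PySem.List.pyGetD points (PySem.Int.mod (i + 1) (PySem.List.len points)) ((0 : Int), (0 : Int))).1,
        max (PySem.List.pyGetD points i ((0 : Int), (0 : Int))).1
          (PySem.List.pyGetD points (PySem.Int.mod (i + 1) (PySem.List.len points)) ((0 : Int), (0 : Int))).1,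
        (PySem.List.pyGetD points i ((0 : Int), (0 : Int))).2)], acc.2))
  (([], []) : List (Int × Int × Int) × List (Int × Int × Int))

-- A's nested is_valid: longest-edge shortcuts, then bisect-narrowed slices of the sorted edge lists
def part2IsValid (lh lv : Int × Int × Int) (hs vs : List (Int × Int × Int))
    (hY vX : List Int) (rx1 ry1 rx2 ry2 : Int) : Bool :=
  if ry1 < lh.2.2 ∧ lh.2.2 < ry2 ∧ ((lh.1 < rx2 ∧ rx2 ≤ lh.2.1) ∨ (lh.1 ≤ rx1 ∧ rx1 < lh.2.1)) then
    false
  else if rx1 < lv.2.2 ∧ lv.2.2 < rx2 ∧ ((lv.1 < ry2 ∧ ry2 ≤ lv.2.1) ∨ (lv.1 ≤ ry1 ∧ ry1 < lv.2.1)) then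
    false
  else if (PySem.List.slice hs (some (PySem.List.bisectRight hY ry1 : Int))
        (some (PySem.List.bisectLeft hY ry2 : Int))).any
      (fun e => decide ((e.1 < rx2 ∧ rx2 ≤ e.2.1) ∨ (e.1 ≤ rx1 ∧ rx1 < e.2.1))) then
    false
  else if (PySem.List.slice vs (some (PySem.List.bisectRight vX rx1 : Int))
        (some (PySem.List.bisectLeft vX rx2 : Int))).any
      (fun e => decide ((e.1 < ry2 ∧ ry2 ≤ e.2.1) ∨ (e.1 ≤ ry1 ∧ ry1 < e.2.1))) then
    false
  else true

-- A's loop over combinations(points, 2) with the area early-out and is_valid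
def part2MainLoop (points : List (Int × Int)) (lh lv : Int × Int × Int)
    (hs vs : List (Int × Int × Int)) (hY vX : List Int) :
    Int × (Option ((Int × Int) × (Int × Int))) :=
  (PySem.List.combinations points 2).foldl (fun st c =>
    match c with
    | [(x1, y1), (x2, y2)] =>
        if (max x1 x2 - min x1 x2 + 1) * (max y1 y2 - min y1 y2 + 1) ≤ st.1 then st
        else if part2IsValid lh lv hs vs hY vX (min x1 x2) (min y1 y2) (max x1 x2) (max y1 y2) then
          ((max x1 x2 - min x1 x2 + 1) * (max y1 y2 - min y1 y2 + 1), some ((x1, y1), (x2, y2)))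
        else st
    | _ => st) (0, none)

def part2 (points : List (Int × Int)) : Int × (Option ((Int × Int) × (Int × Int))) :=
  match PySem.List.max? (part2Edges points).1 (fun t => t.2.1 - t.1),
      PySem.List.max? (part2Edges points).2 (fun t => t.2.1 - t.1) with
  | some lh, some lv =>
      part2MainLoop points lh lv
        (PySem.List.sorted (part2Edges points).1 (fun h => h.2.2) false)
        (PySem.List.sorted (part2Edges points).2 (fun v => v.2.2) false)
        ((PySem.List.sorted (part2Edges points).1 (fun h => h.2.2) false).map (fun h => h.2.2))
        ((PySem.List.sorted (part2Edges points).2 (fun v => v.2.2) false).map (fun v => v.2.2))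
  | _, _ => (0, none)   -- Python raises ValueError (max of an empty sequence); outside Pre_part2

-- ===== PORT B =====
-- B's edge-building loop: zip the points with their rotation by one
def part2AltEdges (points : List (Int × Int)) :
    List (Int × Int × Int) × List (Int × Int × Int) :=
  (points.zip (PySem.List.slice points (some 1) none
      ++ PySem.List.slice points none (some 1))).foldl
    (fun acc pq =>
      if pq.1.1 = pq.2.1 then
        (acc.1, acc.2 ++ [(min pq.1.2 pq.2.2, max pq.1.2 pq.2.2, pq.1.1)])
      else
        (acc.1 ++ [(min pq.1.1 pq.2.1, max pq.1.1 pq.2.1, pq.1.2)], acc.2))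
    (([], []) : List (Int × Int × Int) × List (Int × Int × Int))

-- B's blocked: one linear scan of every edge with the strict-betweenness test inline
def part2AltBlocked (hedges vedges : List (Int × Int × Int)) (rx1 ry1 rx2 ry2 : Int) : Bool :=
  hedges.any (fun e =>
    decide (ry1 < e.2.2 ∧ e.2.2 < ry2 ∧ ((e.1 < rx2 ∧ rx2 ≤ e.2.1) ∨ (e.1 ≤ rx1 ∧ rx1 < e.2.1))))
  || vedges.any (fun e =>
    decide (rx1 < e.2.2 ∧ e.2.2 < rx2 ∧ ((e.1 < ry2 ∧ ry2 ≤ e.2.1) ∨ (e.1 ≤ ry1 ∧ ry1 < e.2.1))))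

-- B's loop over combinations(points, 2)
def part2AltLoop (points : List (Int × Int)) (hedges vedges : List (Int × Int × Int)) :
    Int × (Option ((Int × Int) × (Int × Int))) :=
  (PySem.List.combinations points 2).foldl (fun st c =>
    match c with
    | [(x1, y1), (x2, y2)] =>
        if st.1 < (max x1 x2 - min x1 x2 + 1) * (max y1 y2 - min y1 y2 + 1)
            ∧ part2AltBlocked hedges vedges (min x1 x2) (min y1 y2) (max x1 x2) (max y1 y2) = false then
          ((max x1 x2 - min x1 x2 + 1) * (max y1 y2 - min y1 y2 + 1), some ((x1, y1), (x2, y2)))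
        else st
    | _ => st) (0, none)

def part2_alt (points : List (Int × Int)) : Int × (Option ((Int × Int) × (Int × Int))) :=
  if (part2AltEdges points).1 = [] ∨ (part2AltEdges points).2 = [] then
    (0, none)   -- Python raises ValueError (degenerate polygon); outside Pre_part2
  else part2AltLoop points (part2AltEdges points).1 (part2AltEdges points).2

-- ===== PRECONDITION & SPEC =====
-- the cyclically adjacent point pairs of the input polygon (pure input shape, used only by Pre_/Raises_)
def part2Pairs (points : List (Int × Int)) : List ((Int × Int) × (Int × Int)) :=
  match points with
  | [] => []
  | p :: ps => points.zip (ps ++ [p])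

-- Pre_ excludes exactly the inputs where both Pythons raise ValueError: degenerate polygons
-- with no horizontal or no vertical edge (A: max() of an empty edge list; B: its explicit check).
def Pre_part2 (points : List (Int × Int)) : Prop :=
  (∃ pq ∈ part2Pairs points, pq.1.1 ≠ pq.2.1) ∧ (∃ pq ∈ part2Pairs points, pq.1.1 = pq.2.1)
instance (points : List (Int × Int)) : Decidable (Pre_part2 points) := by
  unfold Pre_part2; infer_instance

def pvWitness_part2 : (List (Int × Int)) := [(0, 0), (7, 0), (7, 5), (0, 5)]

def Spec_part2 (points : List (Int × Int)) (out : Int × (Option ((Int × Int) × (Int × Int)))) : Prop :=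
  out = part2_alt points
instance (points : List (Int × Int)) (out : Int × (Option ((Int × Int) × (Int × Int)))) :
    Decidable (Spec_part2 points out) := by unfold Spec_part2; infer_instance

-- ===== CLAIM (what is proved, stated in full; the proofs are below) =====
def Claim_equal_part2 : Prop :=
  ∀ (points : List (Int × Int)), Dom_part2 points → Pre_part2 points →
    Spec_part2 points (part2 points)

-- ===== LEMMAS AND PROOFS =====

theorem part2Pairs_eq (points : List (Int × Int)) :
    part2Pairs points = points.zip (points.drop 1 ++ points.take 1) := by
  cases points <;> simp [part2Pairs]

-- the edge-building pair sequence of A (indexing with (i+1) % n) is B's zip with the rotation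
theorem pairs_map_eq (points : List (Int × Int)) :
    (PySem.List.pyRange 0 (PySem.List.len points) 1).map
      (fun i => (PySem.List.pyGetD points i ((0 : Int), (0 : Int)),
        PySem.List.pyGetD points (PySem.Int.mod (i + 1) (PySem.List.len points)) ((0 : Int), (0 : Int))))
    = points.zip (points.drop 1 ++ points.take 1) := by
  apply List.ext_getElem
  · simp [PySem.List.length_pyRange_one, PySem.List.len]
    omega
  · intro k h1 h2
    have hk : k < points.length := by
      simpa [PySem.List.length_pyRange_one, PySem.List.len] using h1
    have hn : 0 < points.length := by omega
    rw [List.getElem_map, PySem.List.getElem_pyRange_one]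
    have hi : (0 : Int) + (k : Int) = ((k : Nat) : Int) := by omega
    rw [hi]
    have hcast : ((k : Nat) : Int) + 1 = (((k + 1 : Nat)) : Int) := by push_cast; ring
    rw [hcast]
    have hlen : PySem.List.len points = ((points.length : Nat) : Int) := by
      simp [PySem.List.len]
    rw [hlen, PySem.Int.mod_natCast, PySem.List.pyGetD_natCast, PySem.List.pyGetD_natCast]
    have hm : (k + 1) % points.length < points.length := Nat.mod_lt _ hn
    rw [List.getElem_zip]
    have h1' : points.getD k (0, 0) = points[k] := by
      rw [List.getD_eq_getElem?_getD, List.getElem?_eq_getElem hk]; rfl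
    have h2' : points.getD ((k + 1) % points.length) (0, 0) = points[(k + 1) % points.length] := by
      rw [List.getD_eq_getElem?_getD, List.getElem?_eq_getElem hm]; rfl
    rw [h1', h2']
    congr 1
    by_cases hlast : k + 1 < points.length
    · have : (k + 1) % points.length = k + 1 := Nat.mod_eq_of_lt hlast
      simp only [this]
      rw [List.getElem_append_left (by simp; omega)]
      simp
    · have hk1 : k + 1 = points.length := by omega
      have : (k + 1) % points.length = 0 := by rw [hk1]; simp
      simp only [this]
      have hdl : (points.drop 1).length = points.length - 1 := by simp
      rw [List.getElem_append_right (by omega)]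
      simp [List.getElem_take]
      congr 1
      omega

-- a bisect-narrowed any over the sorted list is the strict-betweenness any over the raw list
theorem slice_any_eq (l : List (Int × Int × Int)) (a b : Int) (p : Int × Int × Int → Bool) :
    (PySem.List.slice (PySem.List.sorted l (fun t => t.2.2) false)
        (some ((PySem.List.bisectRight ((PySem.List.sorted l (fun t => t.2.2) false).map (fun t => t.2.2)) a : Nat) : Int))
        (some ((PySem.List.bisectLeft ((PySem.List.sorted l (fun t => t.2.2) false).map (fun t => t.2.2)) b : Nat) : Int))).any p
    = l.any (fun e => decide (a < e.2.2 ∧ e.2.2 < b) && p e) := by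
  set s := PySem.List.sorted l (fun t => t.2.2) false with hs
  set Y := s.map (fun t => t.2.2) with hY
  set BR := PySem.List.bisectRight Y a with hBR
  set BL := PySem.List.bisectLeft Y b with hBL
  have hpw : Y.Pairwise (· ≤ ·) := PySem.List.sorted_map_key_pairwise l (fun t => t.2.2)
  obtain ⟨hR1, hR2, hR3⟩ := PySem.List.bisectRight_spec Y a hpw
  obtain ⟨hL1, hL2, hL3⟩ := PySem.List.bisectLeft_spec Y b hpw
  have hlenY : Y.length = s.length := by simp [hY]
  have hperm : l.any (fun e => decide (a < e.2.2 ∧ e.2.2 < b) && p e)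
      = s.any (fun e => decide (a < e.2.2 ∧ e.2.2 < b) && p e) :=
    (List.Perm.any_eq (PySem.List.sorted_perm l (fun t => t.2.2) false)).symm
  rw [hperm, PySem.List.slice_natCast, Bool.eq_iff_iff]
  simp only [List.any_eq_true]
  constructor
  · rintro ⟨x, hx, hpx⟩
    obtain ⟨m, hm, hxe⟩ := List.mem_iff_getElem.1 hx
    have hmlen : m < BL - BR ∧ BR + m < s.length := by
      constructor
      · have := hm; simp [List.length_take, List.length_drop] at this; omega
      · have := hm; simp [List.length_take, List.length_drop] at this; omega
    have hget : ((s.drop BR).take (BL - BR))[m] = s[BR + m]'(hmlen.2) := by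
      rw [List.getElem_take, List.getElem_drop]
    have hj : BR + m < s.length := hmlen.2
    have hjY : BR + m < Y.length := by omega
    have ha : a < s[BR + m].2.2 := by
      have := hR3 (BR + m) hjY (by omega)
      simpa [hY, List.getElem_map] using this
    have hb : s[BR + m].2.2 < b := by
      have := hL2 (BR + m) hjY (by omega)
      simpa [hY, List.getElem_map] using this
    refine ⟨s[BR + m], List.getElem_mem hj, ?_⟩
    have hxe2 : x = s[BR + m]'(hmlen.2) := by rw [← hxe, hget]
    rw [hxe2] at hpx
    simp [ha, hb, hpx]
  · rintro ⟨e, he, hpe⟩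
    simp only [Bool.and_eq_true, decide_eq_true_eq] at hpe
    obtain ⟨⟨ha, hb⟩, hp⟩ := hpe
    obtain ⟨j, hj, hje⟩ := List.mem_iff_getElem.1 he
    have hjY : j < Y.length := by omega
    have hYj : Y[j] = e.2.2 := by simp [hY, List.getElem_map, hje]
    have hjBR : BR ≤ j := by
      by_contra hlt
      have := hR2 j hjY (by omega)
      rw [hYj] at this; omega
    have hjBL : j < BL := by
      by_contra hge
      have := hL3 j hjY (by omega)
      rw [hYj] at this; omega
    refine ⟨e, ?_, hp⟩
    rw [List.mem_iff_getElem]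
    refine ⟨j - BR, by simp [List.length_take, List.length_drop]; omega, ?_⟩
    rw [List.getElem_take, List.getElem_drop]
    have : BR + (j - BR) = j := by omega
    simp only [this, hje]

-- A's is_valid (longest-edge shortcuts + bisect slices) equals the negation of B's linear scan
theorem isValid_eq (he ve : List (Int × Int × Int)) (lh lv : Int × Int × Int)
    (hlh : PySem.List.max? he (fun t => t.2.1 - t.1) = some lh)
    (hlv : PySem.List.max? ve (fun t => t.2.1 - t.1) = some lv)
    (rx1 ry1 rx2 ry2 : Int) :
    part2IsValid lh lv (PySem.List.sorted he (fun t => t.2.2) false)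
      (PySem.List.sorted ve (fun t => t.2.2) false)
      ((PySem.List.sorted he (fun t => t.2.2) false).map (fun t => t.2.2))
      ((PySem.List.sorted ve (fun t => t.2.2) false).map (fun t => t.2.2)) rx1 ry1 rx2 ry2
    = ! part2AltBlocked he ve rx1 ry1 rx2 ry2 := by
  have hH := slice_any_eq he ry1 ry2
    (fun e => decide ((e.1 < rx2 ∧ rx2 ≤ e.2.1) ∨ (e.1 ≤ rx1 ∧ rx1 < e.2.1)))
  have hV := slice_any_eq ve rx1 rx2
    (fun e => decide ((e.1 < ry2 ∧ ry2 ≤ e.2.1) ∨ (e.1 ≤ ry1 ∧ ry1 < e.2.1)))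
  unfold part2IsValid part2AltBlocked
  have hreH : (he.any fun e => decide (ry1 < e.2.2 ∧ e.2.2 < ry2) &&
        decide ((e.1 < rx2 ∧ rx2 ≤ e.2.1) ∨ (e.1 ≤ rx1 ∧ rx1 < e.2.1)))
      = he.any fun e => decide (ry1 < e.2.2 ∧ e.2.2 < ry2 ∧
        ((e.1 < rx2 ∧ rx2 ≤ e.2.1) ∨ (e.1 ≤ rx1 ∧ rx1 < e.2.1))) := by
    apply PySem.List.any_congr_mem
    intro e _
    by_cases h1 : ry1 < e.2.2 ∧ e.2.2 < ry2 <;>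
      by_cases h2 : (e.1 < rx2 ∧ rx2 ≤ e.2.1) ∨ (e.1 ≤ rx1 ∧ rx1 < e.2.1) <;>
      simp [h1, h2]
  have hreV : (ve.any fun e => decide (rx1 < e.2.2 ∧ e.2.2 < rx2) &&
        decide ((e.1 < ry2 ∧ ry2 ≤ e.2.1) ∨ (e.1 ≤ ry1 ∧ ry1 < e.2.1)))
      = ve.any fun e => decide (rx1 < e.2.2 ∧ e.2.2 < rx2 ∧
        ((e.1 < ry2 ∧ ry2 ≤ e.2.1) ∨ (e.1 ≤ ry1 ∧ ry1 < e.2.1))) := by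
    apply PySem.List.any_congr_mem
    intro e _
    by_cases h1 : rx1 < e.2.2 ∧ e.2.2 < rx2 <;>
      by_cases h2 : (e.1 < ry2 ∧ ry2 ≤ e.2.1) ∨ (e.1 ≤ ry1 ∧ ry1 < e.2.1) <;>
      simp [h1, h2]
  rw [hH, hreH, hV, hreV]
  set AH := he.any fun e => decide (ry1 < e.2.2 ∧ e.2.2 < ry2 ∧
    ((e.1 < rx2 ∧ rx2 ≤ e.2.1) ∨ (e.1 ≤ rx1 ∧ rx1 < e.2.1))) with hAHdef
  set AV := ve.any fun e => decide (rx1 < e.2.2 ∧ e.2.2 < rx2 ∧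
    ((e.1 < ry2 ∧ ry2 ≤ e.2.1) ∨ (e.1 ≤ ry1 ∧ ry1 < e.2.1))) with hAVdef
  by_cases hC1 : ry1 < lh.2.2 ∧ lh.2.2 < ry2 ∧ ((lh.1 < rx2 ∧ rx2 ≤ lh.2.1) ∨ (lh.1 ≤ rx1 ∧ rx1 < lh.2.1))
  · have hAH : AH = true := List.any_eq_true.2 ⟨lh, PySem.List.max?_mem hlh, decide_eq_true hC1⟩
    rw [if_pos hC1, hAH]
    simp
  · rw [if_neg hC1]
    by_cases hC2 : rx1 < lv.2.2 ∧ lv.2.2 < rx2 ∧ ((lv.1 < ry2 ∧ ry2 ≤ lv.2.1) ∨ (lv.1 ≤ ry1 ∧ ry1 < lv.2.1))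
    · have hAV : AV = true := List.any_eq_true.2 ⟨lv, PySem.List.max?_mem hlv, decide_eq_true hC2⟩
      rw [if_pos hC2, hAV]
      simp
    · rw [if_neg hC2]
      cases hA : AH <;> cases hB : AV <;> simp

-- the shared edge-building fold, characterised as two filters of the pair list
theorem edges_fold_eq (pairs : List ((Int × Int) × (Int × Int))) :
    pairs.foldl (fun acc pq =>
      if pq.1.1 = pq.2.1 then (acc.1, acc.2 ++ [(min pq.1.2 pq.2.2, max pq.1.2 pq.2.2, pq.1.1)])
      else (acc.1 ++ [(min pq.1.1 pq.2.1, max pq.1.1 pq.2.1, pq.1.2)], acc.2))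
      (([], []) : List (Int × Int × Int) × List (Int × Int × Int))
    = ((pairs.filter (fun pq => decide ¬(pq.1.1 = pq.2.1))).map
        (fun pq => (min pq.1.1 pq.2.1, max pq.1.1 pq.2.1, pq.1.2)),
       (pairs.filter (fun pq => decide (pq.1.1 = pq.2.1))).map
        (fun pq => (min pq.1.2 pq.2.2, max pq.1.2 pq.2.2, pq.1.1))) := by
  rw [PySem.List.foldl_congr_mem pairs _
    (fun acc pq =>
      ((fun (a : List (Int × Int × Int)) (pq : (Int × Int) × (Int × Int)) =>
          if ¬(pq.1.1 = pq.2.1) then a ++ [(min pq.1.1 pq.2.1, max pq.1.1 pq.2.1, pq.1.2)] else a) acc.1 pq,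
       (fun (a : List (Int × Int × Int)) (pq : (Int × Int) × (Int × Int)) =>
          if pq.1.1 = pq.2.1 then a ++ [(min pq.1.2 pq.2.2, max pq.1.2 pq.2.2, pq.1.1)] else a) acc.2 pq)) _
    (by intro acc pq _; by_cases h : pq.1.1 = pq.2.1 <;> simp [h])]
  rw [PySem.List.foldl_prod_mk
    (f := fun (a : List (Int × Int × Int)) (pq : (Int × Int) × (Int × Int)) =>
      if ¬(pq.1.1 = pq.2.1) then a ++ [(min pq.1.1 pq.2.1, max pq.1.1 pq.2.1, pq.1.2)] else a)
    (g := fun (a : List (Int × Int × Int)) (pq : (Int × Int) × (Int × Int)) =>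
      if pq.1.1 = pq.2.1 then a ++ [(min pq.1.2 pq.2.2, max pq.1.2 pq.2.2, pq.1.1)] else a)]
  rw [PySem.List.foldl_append_ite, PySem.List.foldl_append_ite]
  simp

-- the two edge-building loops agree
theorem edges_eq (points : List (Int × Int)) : part2Edges points = part2AltEdges points := by
  unfold part2Edges part2AltEdges
  rw [PySem.List.slice_from points (by norm_num : (0:Int) ≤ 1),
    PySem.List.slice_to points (by norm_num : (0:Int) ≤ 1)]
  simp only [Int.toNat_one]
  conv_rhs => rw [← pairs_map_eq points, List.foldl_map]

-- B's edge lists, characterised as filters of the cyclic pair list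
theorem altEdges_char (points : List (Int × Int)) :
    part2AltEdges points
    = (((part2Pairs points).filter (fun pq => decide ¬(pq.1.1 = pq.2.1))).map
        (fun pq => (min pq.1.1 pq.2.1, max pq.1.1 pq.2.1, pq.1.2)),
       ((part2Pairs points).filter (fun pq => decide (pq.1.1 = pq.2.1))).map
        (fun pq => (min pq.1.2 pq.2.2, max pq.1.2 pq.2.2, pq.1.1))) := by
  unfold part2AltEdges
  rw [PySem.List.slice_from points (by norm_num : (0:Int) ≤ 1),
    PySem.List.slice_to points (by norm_num : (0:Int) ≤ 1)]
  simp only [Int.toNat_one]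
  rw [← part2Pairs_eq]
  exact edges_fold_eq (part2Pairs points)

-- the two main loops agree once the edge lists coincide
theorem loop_eq (points : List (Int × Int)) (he ve : List (Int × Int × Int))
    (lh lv : Int × Int × Int)
    (hlh : PySem.List.max? he (fun t => t.2.1 - t.1) = some lh)
    (hlv : PySem.List.max? ve (fun t => t.2.1 - t.1) = some lv) :
    part2MainLoop points lh lv
      (PySem.List.sorted he (fun t => t.2.2) false)
      (PySem.List.sorted ve (fun t => t.2.2) false)
      ((PySem.List.sorted he (fun t => t.2.2) false).map (fun t => t.2.2))
      ((PySem.List.sorted ve (fun t => t.2.2) false).map (fun t => t.2.2))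
    = part2AltLoop points he ve := by
  unfold part2MainLoop part2AltLoop
  apply PySem.List.foldl_congr_mem
  intro st c _
  rcases c with _ | ⟨⟨x1, y1⟩, _ | ⟨⟨x2, y2⟩, rest⟩⟩
  · rfl
  · rfl
  · cases rest with
    | cons r rs => rfl
    | nil =>
      simp only []
      rw [isValid_eq he ve lh lv hlh hlv]
      by_cases harea : (max x1 x2 - min x1 x2 + 1) * (max y1 y2 - min y1 y2 + 1) ≤ st.1
      · rw [if_pos harea, if_neg (by omega)]
      · rw [if_neg harea]
        cases hb : part2AltBlocked he ve (min x1 x2) (min y1 y2) (max x1 x2) (max y1 y2)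
        · rw [if_pos (by simp), if_pos ⟨by omega, rfl⟩]
        · rw [if_neg (by simp), if_neg (by simp)]

theorem part2_eq (points : List (Int × Int)) (hpre : Pre_part2 points) :
    part2 points = part2_alt points := by
  obtain ⟨⟨pqh, hpqh, hneh⟩, ⟨pqv, hpqv, heqv⟩⟩ := hpre
  have hne1 : (part2AltEdges points).1 ≠ [] := by
    rw [altEdges_char]
    simp only [ne_eq, List.map_eq_nil_iff, List.filter_eq_nil_iff]
    intro hall
    exact absurd (by simpa using hall pqh hpqh) (by simpa using hneh)
  have hne2 : (part2AltEdges points).2 ≠ [] := by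
    rw [altEdges_char]
    simp only [ne_eq, List.map_eq_nil_iff, List.filter_eq_nil_iff]
    intro hall
    exact absurd (by simpa using hall pqv hpqv) (by simpa using heqv)
  unfold part2 part2_alt
  rw [edges_eq]
  cases hmh : PySem.List.max? (part2AltEdges points).1 (fun t => t.2.1 - t.1) with
  | none => exact absurd ((PySem.List.max?_eq_none_iff _ _).1 hmh) hne1
  | some lh =>
    cases hmv : PySem.List.max? (part2AltEdges points).2 (fun t => t.2.1 - t.1) with
    | none => exact absurd ((PySem.List.max?_eq_none_iff _ _).1 hmv) hne2
    | some lv =>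
      rw [if_neg (by simp [hne1, hne2])]
      exact loop_eq points (part2AltEdges points).1 (part2AltEdges points).2 lh lv hmh hmv

-- ===== VERDICT (by name: the statement is the Claim_ definition above) =====
theorem part2_spec : Claim_equal_part2 := by
  intro points _ hpre
  unfold Spec_part2
  exact part2_eq points hpre
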